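-- pv_equiv track=rewrite | github.com/galnaftaly/TweetAnalyzer | backend/BGSRD/build_graph.py | calculate_word_window_frequency
-- ===== SOURCE A (Python) =====
-- from collections import Counter
--
-- def calculate_word_window_frequency(windows):
--     # word_window_freq dictionary with frequency of each word in different windows
--     word_window_freq = Counter()
--     for window in windows:
--         appeared = set()
--         for i in range(len(window)):
--             if window[i] in appeared:
--                 continue
--             word_window_freq[window[i]] += 1
--             appeared.add(window[i])
--     return word_window_freq
-- ===== SOURCE B (Python) =====
-- from collections import Counter, defaultdict
--
-- def calculate_word_window_frequency(windows):
--     # Inverted index: each word -> set of window indices it occurs in;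
--     # the document frequency is then the size of that index set.
--     word_windows = defaultdict(set)
--     for idx, window in enumerate(windows):
--         for word in window:
--             word_windows[word].add(idx)
--     return Counter({word: len(idxs) for word, idxs in word_windows.items()})
-- ===== Notes on version B (the rewrite author's own statement) =====
-- stated objective: alternative
-- what changed: B replaces A's running Counter plus per-window 'appeared' set by an inverted index (word -> set of window indices) built in one pass, and derives the final Counter from the sizes of those index sets.
import Mathlib
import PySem

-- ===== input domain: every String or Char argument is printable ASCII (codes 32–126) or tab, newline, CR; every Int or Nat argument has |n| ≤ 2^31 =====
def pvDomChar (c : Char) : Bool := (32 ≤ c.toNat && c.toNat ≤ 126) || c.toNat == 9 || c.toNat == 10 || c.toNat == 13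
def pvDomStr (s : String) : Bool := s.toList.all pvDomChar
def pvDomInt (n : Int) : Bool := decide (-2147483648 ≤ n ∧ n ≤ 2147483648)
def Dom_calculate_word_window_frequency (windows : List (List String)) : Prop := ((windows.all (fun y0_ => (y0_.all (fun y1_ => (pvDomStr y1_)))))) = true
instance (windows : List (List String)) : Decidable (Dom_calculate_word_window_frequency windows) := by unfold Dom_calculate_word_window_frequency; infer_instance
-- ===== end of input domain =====

-- B replaces A's running Counter + per-window 'appeared' set by an inverted index
-- (word -> set of window indices); same cost, alternative decomposition.

-- ===== PORT A =====
def calculate_word_window_frequency (windows : List (List String)) : List (String × Int) :=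
  (windows.foldl
    (fun (freq : PySem.Dict String Int) window =>
      ((PySem.List.pyRange 0 (PySem.List.len window)).foldl
        (fun (p : PySem.Dict String Int × PySem.Set String) i =>
          if p.2.contains (PySem.List.pyGetD window i "") then p
          else (p.1.modify (PySem.List.pyGetD window i "") 0 (· + 1),
                PySem.Set.add p.2 (PySem.List.pyGetD window i "")))
        (freq, PySem.Set.empty)).1)
    PySem.Dict.empty).items

-- ===== PORT B =====
def calculate_word_window_frequency_alt (windows : List (List String)) : List (String × Int) :=
  ((PySem.List.enumerate windows).foldl
    (fun (d : PySem.Dict String (PySem.Set Int)) iw =>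
      iw.2.foldl (fun d word => d.modify word PySem.Set.empty (fun s => PySem.Set.add s iw.1)) d)
    PySem.Dict.empty).items.map (fun p => (p.1, PySem.Set.len p.2))

-- ===== PRECONDITION & SPEC =====
def Spec_calculate_word_window_frequency (windows : List (List String)) (out : List (String × Int)) : Prop := out = calculate_word_window_frequency_alt windows
instance (windows : List (List String)) (out : List (String × Int)) : Decidable (Spec_calculate_word_window_frequency windows out) := by unfold Spec_calculate_word_window_frequency; infer_instance

-- ===== CLAIM (what is proved, stated in full; the proofs are below) =====
def Claim_equal_calculate_word_window_frequency : Prop := ∀ (windows : List (List String)), Dom_calculate_word_window_frequency windows → Spec_calculate_word_window_frequency windows (calculate_word_window_frequency windows)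

-- ===== LEMMAS AND PROOFS =====


def pvStepA (p : PySem.Dict String Int × PySem.Set String) (w : String) :
    PySem.Dict String Int × PySem.Set String :=
  if p.2.contains w then p
  else (p.1.modify w 0 (· + 1), PySem.Set.add p.2 w)

def pvStepB (idx : Int) (d : PySem.Dict String (PySem.Set Int)) (w : String) :
    PySem.Dict String (PySem.Set Int) :=
  d.modify w PySem.Set.empty (fun s => PySem.Set.add s idx)

def pvG (p : String × PySem.Set Int) : String × Int := (p.1, PySem.Set.len p.2)

theorem pv_contains_iff {α : Type} [BEq α] [LawfulBEq α] (s : PySem.Set α) (x : α) :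
    s.contains x = true ↔ x ∈ s := List.contains_iff_mem

theorem pv_exists_val (d : PySem.Dict String (PySem.Set Int)) (w : String)
    (hc : d.contains w = true) : (w, d.getD w ([] : PySem.Set Int)) ∈ d.items := by
  rw [PySem.Dict.contains_eq_isSome_get?] at hc
  obtain ⟨v, hv⟩ := Option.isSome_iff_exists.mp hc
  have hm := PySem.Dict.mem_items_of_get?_eq_some d hv
  have hg : d.getD w ([] : PySem.Set Int) = v := by
    rw [PySem.Dict.getD_eq_get?_getD, hv]; rfl
  rwa [hg]

theorem pv_inner (idx : Int) :
    ∀ (ws : List String) (freq : PySem.Dict String Int) (app : PySem.Set String)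
      (d : PySem.Dict String (PySem.Set Int)),
      freq.items = d.items.map pvG →
      d.keys.Nodup →
      (∀ w, app.contains w = (d.getD w ([] : PySem.Set Int)).contains idx) →
      (∀ p ∈ d.items, ∀ j ∈ p.2, j ≤ idx) →
      (ws.foldl pvStepA (freq, app)).1.items = (ws.foldl (pvStepB idx) d).items.map pvG ∧
      (ws.foldl (pvStepB idx) d).keys.Nodup ∧
      (∀ p ∈ (ws.foldl (pvStepB idx) d).items, ∀ j ∈ p.2, j ≤ idx) := by
  intro ws
  induction ws with
  | nil => intro freq app d h1 h2 h3 h4; exact ⟨h1, h2, h4⟩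
  | cons w ws ih =>
    intro freq app d h1 h2 h3 h4
    have hkeys : freq.keys = d.keys := by
      show freq.items.map (·.1) = d.items.map (·.1)
      rw [h1, List.map_map]; rfl
    have hfnod : freq.keys.Nodup := hkeys ▸ h2
    have hcc : freq.contains w = d.contains w := by
      rw [PySem.Dict.contains_eq_decide_mem_keys, PySem.Dict.contains_eq_decide_mem_keys, hkeys]
    simp only [List.foldl_cons]
    by_cases hw : app.contains w = true
    · -- word already seen in this window: A skips, B's set-add is a no-op
      have hs : (d.getD w ([] : PySem.Set Int)).contains idx = true := by rw [← h3 w]; exact hw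
      have hmem : idx ∈ d.getD w ([] : PySem.Set Int) := List.contains_iff_mem.mp hs
      have hwmem : w ∈ app := List.contains_iff_mem.mp hw
      have hc : d.contains w = true := by
        by_contra hc
        rw [PySem.Dict.getD_of_not_contains d ([] : PySem.Set Int)
          (Bool.not_eq_true _ ▸ hc)] at hmem
        simp at hmem
      have hadd : PySem.Set.add (d.getD w ([] : PySem.Set Int)) idx
          = d.getD w ([] : PySem.Set Int) := by
        simp [PySem.Set.add, hmem]
      have hB : pvStepB idx d w = d := by
        show d.insert w (PySem.Set.add (d.getD w ([] : PySem.Set Int)) idx) = d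
        rw [hadd]
        apply PySem.Dict.ext
        rw [PySem.Dict.items_insert_of_contains d _ hc]
        conv_rhs => rw [← List.map_id d.items]
        apply List.map_congr_left
        intro p hp
        by_cases hpw : p.1 = w
        · have hpv : d.getD w ([] : PySem.Set Int) = p.2 := by
            have hm : (w, p.2) ∈ d.items := by rw [← hpw]; exact hp
            exact PySem.Dict.getD_of_mem_items d hm h2 _
          simp [hpw, hpv, Prod.ext_iff]
        · simp [hpw]
      have hA : pvStepA (freq, app) w = (freq, app) := by simp [pvStepA, hwmem]
      rw [hA, hB]
      exact ih freq app d h1 h2 h3 h4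
    · -- new word in this window
      have hwf : app.contains w = false := Bool.not_eq_true _ ▸ hw
      have hs : (d.getD w ([] : PySem.Set Int)).contains idx = false := by
        rw [← h3 w]; exact hwf
      have hnm : idx ∉ d.getD w ([] : PySem.Set Int) := fun hm => by
        rw [(pv_contains_iff _ _).mpr hm] at hs; exact absurd hs (by simp)
      have hadd : PySem.Set.add (d.getD w ([] : PySem.Set Int)) idx
          = d.getD w ([] : PySem.Set Int) ++ [idx] := by
        simp [PySem.Set.add, hnm]
      have hwm : w ∉ app := fun hm => by
        rw [(pv_contains_iff _ _).mpr hm] at hwf; exact absurd hwf (by simp)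
      have haddapp : PySem.Set.add app w = app ++ [w] := by
        simp [PySem.Set.add, hwm]
      have hA : pvStepA (freq, app) w = (freq.modify w 0 (· + 1), PySem.Set.add app w) := by
        simp [pvStepA, hwm]
      have hBi : pvStepB idx d w = d.insert w (d.getD w ([] : PySem.Set Int) ++ [idx]) := by
        show d.insert w (PySem.Set.add (d.getD w ([] : PySem.Set Int)) idx) = _
        rw [hadd]
      have hAi : freq.modify w 0 (· + 1) = freq.insert w (freq.getD w 0 + 1) := rfl
      rw [hA, hBi, hAi]
      -- establish the four invariants for the tail
      apply ih
      · -- items relation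
        by_cases hc : d.contains w = true
        · have hcf : freq.contains w = true := hcc ▸ hc
          rw [PySem.Dict.items_insert_of_contains freq _ hcf,
              PySem.Dict.items_insert_of_contains d _ hc, h1, List.map_map, List.map_map]
          apply List.map_congr_left
          intro p hp
          by_cases hpw : p.1 = w
          · have hpv : d.getD w ([] : PySem.Set Int) = p.2 := by
              have hm : (w, p.2) ∈ d.items := by rw [← hpw]; exact hp
              exact PySem.Dict.getD_of_mem_items d hm h2 _
            have hfv : freq.getD w 0 = PySem.Set.len p.2 := by
              have hm : (w, PySem.Set.len p.2) ∈ freq.items := by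
                rw [h1]
                exact List.mem_map.mpr ⟨p, hp, by simp [pvG, hpw]⟩
              exact PySem.Dict.getD_of_mem_items freq hm hfnod _
            simp [Function.comp, pvG, hpw, hfv, hpv, PySem.Set.len]
          · simp [Function.comp, pvG, hpw]
        · have hc' : d.contains w = false := Bool.not_eq_true _ ▸ hc
          have hcf : freq.contains w = false := hcc ▸ hc'
          have hdv : d.getD w ([] : PySem.Set Int) = [] :=
            PySem.Dict.getD_of_not_contains d ([] : PySem.Set Int) hc'
          rw [PySem.Dict.items_insert_of_not_contains freq _ hcf,
              PySem.Dict.items_insert_of_not_contains d _ hc',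
              PySem.Dict.getD_of_not_contains freq _ hcf, h1, List.map_append]
          simp [pvG, hdv, PySem.Set.len]
      · -- keys nodup
        by_cases hc : d.contains w = true
        · rw [PySem.Dict.keys_insert_of_contains d _ hc]; exact h2
        · have hc' : d.contains w = false := Bool.not_eq_true _ ▸ hc
          rw [PySem.Dict.keys_insert_of_not_contains d _ hc']
          have hnk : w ∉ d.keys := by
            rw [PySem.Dict.contains_eq_decide_mem_keys] at hc'
            simpa using hc'
          rw [List.nodup_append]
          refine ⟨h2, List.nodup_singleton w, ?_⟩
          intro a ha b hb
          rw [List.mem_singleton.mp hb]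
          exact fun he => hnk (he ▸ ha)
      · -- appeared ↔ idx in the word's index set
        intro w'
        rw [haddapp, PySem.Dict.getD_insert]
        by_cases hww : w' = w
        · subst hww
          rw [if_pos rfl, Bool.eq_iff_iff]
          simp only [pv_contains_iff]
          simp
        · rw [if_neg hww, ← h3 w', Bool.eq_iff_iff]
          simp only [pv_contains_iff]
          simp [hww]
      · -- all indices ≤ idx
        intro p hp j hj
        rcases (PySem.Dict.mem_items_insert d _ _ p).mp hp with hpe | ⟨hpd, _⟩
        · subst hpe
          rcases List.mem_append.mp hj with hjs | hji
          · by_cases hc : d.contains w = true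
            · exact h4 _ (pv_exists_val d w hc) j hjs
            · rw [PySem.Dict.getD_of_not_contains d ([] : PySem.Set Int)
                (Bool.not_eq_true _ ▸ hc)] at hjs
              simp at hjs
          · simp at hji; omega
        · exact h4 p hpd j hj

theorem pv_outer :
    ∀ (ws : List (List String)) (n : Int) (freq : PySem.Dict String Int)
      (d : PySem.Dict String (PySem.Set Int)),
      freq.items = d.items.map pvG →
      d.keys.Nodup →
      (∀ p ∈ d.items, ∀ j ∈ p.2, j < n) →
      (ws.foldl (fun freq window => (window.foldl pvStepA (freq, PySem.Set.empty)).1) freq).items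
        = ((PySem.List.enumerate ws n).foldl
            (fun d iw => iw.2.foldl
              (fun d word => d.modify word PySem.Set.empty (fun s => PySem.Set.add s iw.1)) d)
            d).items.map pvG := by
  intro ws
  induction ws with
  | nil => intro n freq d h1 _ _; exact h1
  | cons window ws ih =>
    intro n freq d h1 h2 h4
    rw [PySem.List.enumerate_cons]
    simp only [List.foldl_cons]
    have h3 : ∀ w, (PySem.Set.empty : PySem.Set String).contains w
        = (d.getD w ([] : PySem.Set Int)).contains n := by
      intro w
      by_cases hc : d.contains w = true
      · have hmem := pv_exists_val d w hc
        have hlt := h4 _ hmem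
        have hn : n ∉ d.getD w ([] : PySem.Set Int) := fun hm => absurd (hlt n hm) (by omega)
        rw [Bool.eq_iff_iff]
        simp only [pv_contains_iff]
        simp [PySem.Set.empty, hn]
      · rw [PySem.Dict.getD_of_not_contains d ([] : PySem.Set Int) (Bool.not_eq_true _ ▸ hc)]
        rfl
    obtain ⟨e1, e2, e3⟩ := pv_inner n window freq PySem.Set.empty d h1 h2 h3
        (fun p hp j hj => le_of_lt (h4 p hp j hj))
    exact ih (n + 1) _ _ e1 e2 (fun p hp j hj => lt_of_le_of_lt (e3 p hp j hj) (by omega))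

-- A's inner loop over range(len(window)) is the fold of pvStepA over the window's words
theorem pv_innerA (window : List String) (freq : PySem.Dict String Int) :
    ((PySem.List.pyRange 0 (PySem.List.len window)).foldl
        (fun (p : PySem.Dict String Int × PySem.Set String) i =>
          if p.2.contains (PySem.List.pyGetD window i "") then p
          else (p.1.modify (PySem.List.pyGetD window i "") 0 (· + 1),
                PySem.Set.add p.2 (PySem.List.pyGetD window i "")))
        (freq, PySem.Set.empty)) = window.foldl pvStepA (freq, PySem.Set.empty) := by
  have h := PySem.List.foldl_pyRange_pyGetD window "" pvStepA (freq, PySem.Set.empty) (a := 0)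
    le_rfl
  simpa [pvStepA] using h

-- ===== VERDICT (by name: the statement is the Claim_ definition above) =====
theorem calculate_word_window_frequency_spec : Claim_equal_calculate_word_window_frequency := by
  intro windows _
  unfold Spec_calculate_word_window_frequency calculate_word_window_frequency
    calculate_word_window_frequency_alt
  have hstep : (fun (freq : PySem.Dict String Int) (window : List String) =>
      ((PySem.List.pyRange 0 (PySem.List.len window)).foldl
        (fun (p : PySem.Dict String Int × PySem.Set String) i =>
          if p.2.contains (PySem.List.pyGetD window i "") then p
          else (p.1.modify (PySem.List.pyGetD window i "") 0 (· + 1),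
                PySem.Set.add p.2 (PySem.List.pyGetD window i "")))
        (freq, PySem.Set.empty)).1)
      = fun freq window => (window.foldl pvStepA (freq, PySem.Set.empty)).1 := by
    funext freq window
    rw [pv_innerA]
  rw [hstep]
  exact pv_outer windows 0 PySem.Dict.empty PySem.Dict.empty rfl
    (by simp [PySem.Dict.keys_empty]) (by intro p hp; simp [PySem.Dict.empty] at hp)
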